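-- pv_equiv track=rewrite | github.com/zingale/zingale.github.io | paper-sorter/parser.py | name_string
-- ===== SOURCE A (Python) =====
-- def name_string(names):
--     """string together the authors into a single string"""
--     nm_str = ""
--     if len(names) == 1:
--         nm_str = "{}".format(names[0])
--     else:
--         for n, a in enumerate(names):
--             if n < len(names)-1:
--                 astr = "{}, "
--             else:
--                 astr = "&amp; {}"
--             nm_str += astr.format(a)
--     return nm_str
-- ===== SOURCE B (Python) =====
-- def name_string(names):
--     """string together the authors into a single string"""
--     if not names:
--         return ""
--     if len(names) == 1:
--         return str(names[0])
--     return ", ".join(str(n) for n in names[:-1]) + ", &amp; " + str(names[-1])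
-- ===== Notes on version B (the rewrite author's own statement) =====
-- stated objective: simpler
-- what changed: Replaces the indexed loop with its per-element last-vs-not branch by an up-front split into empty/single cases plus a body/last decomposition: join all but the last name with ', ' and append ', &amp; ' and the last name.
import Mathlib
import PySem

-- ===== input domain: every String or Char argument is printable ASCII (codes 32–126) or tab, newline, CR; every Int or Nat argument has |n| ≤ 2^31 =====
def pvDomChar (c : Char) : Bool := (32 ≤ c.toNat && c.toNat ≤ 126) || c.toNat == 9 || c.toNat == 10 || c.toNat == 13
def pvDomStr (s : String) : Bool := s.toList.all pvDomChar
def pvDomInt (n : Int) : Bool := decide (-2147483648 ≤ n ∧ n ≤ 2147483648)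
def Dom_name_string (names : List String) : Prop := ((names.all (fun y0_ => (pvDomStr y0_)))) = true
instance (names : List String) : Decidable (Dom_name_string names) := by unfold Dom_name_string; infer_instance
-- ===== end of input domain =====

-- B replaces A's indexed loop (last-vs-not branch inside the loop) by an up-front
-- empty/single split plus join-body-then-append-last; same result, simpler decomposition.

-- ===== PORT A =====
def name_string (names : List String) : String :=
  if names.length = 1 then names.headD ""
  else
    (PySem.List.enumerate names).foldl
      (fun nm_str p =>
        nm_str ++ (if p.1 < (names.length : Int) - 1 then p.2 ++ ", " else "&amp; " ++ p.2))
      ""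

-- ===== PORT B =====
def name_string_alt (names : List String) : String :=
  match names with
  | [] => ""
  | [x] => x
  | _ :: _ :: _ => PySem.Str.join ", " names.dropLast ++ ", &amp; " ++ names.getLastD ""

-- ===== PRECONDITION & SPEC =====
def Spec_name_string (names : List String) (out : String) : Prop := out = name_string_alt names
instance (names : List String) (out : String) : Decidable (Spec_name_string names out) := by unfold Spec_name_string; infer_instance

-- ===== CLAIM (what is proved, stated in full; the proofs are below) =====
def Claim_equal_name_string : Prop := ∀ (names : List String), Dom_name_string names → Spec_name_string names (name_string names)

-- ===== LEMMAS AND PROOFS =====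

-- the string A's loop appends after acc, characterised structurally
def pvBody : List String → String
  | [] => ""
  | [x] => "&amp; " ++ x
  | x :: y :: rest => x ++ ", " ++ pvBody (y :: rest)

theorem pv_join_cons_cons (x y : String) (rest : List String) :
    PySem.Str.join ", " (x :: y :: rest) = x ++ ", " ++ PySem.Str.join ", " (y :: rest) := by
  apply String.toList_inj.mp
  simp [PySem.Str.toList_join, PySem.Chars.join_cons_cons]

theorem pv_fold_eq_body (l : List String) (s n : Int) (acc : String)
    (h : s + l.length = n) (hne : l ≠ []) :
    (PySem.List.enumerate l s).foldl
      (fun nm_str p =>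
        nm_str ++ (if p.1 < n - 1 then p.2 ++ ", " else "&amp; " ++ p.2)) acc
    = acc ++ pvBody l := by
  induction l generalizing s acc with
  | nil => exact absurd rfl hne
  | cons x t ih =>
    cases t with
    | nil =>
      simp only [PySem.List.enumerate_cons, PySem.List.enumerate_nil, List.foldl_cons,
        List.foldl_nil, pvBody]
      have : ¬ (s < n - 1) := by simp at h; omega
      simp [this]
    | cons y r =>
      have hs : s < n - 1 := by simp at h; omega
      rw [PySem.List.enumerate_cons, List.foldl_cons]
      rw [ih (s + 1) (acc ++ (if s < n - 1 then x ++ ", " else "&amp; " ++ x))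
        (by simp at h ⊢; omega) (by simp)]
      simp only [hs, if_pos, pvBody]
      rw [String.append_assoc, String.append_assoc]

theorem pv_body_eq_alt (x y : String) (rest : List String) :
    pvBody (x :: y :: rest)
    = PySem.Str.join ", " ((x :: y :: rest).dropLast) ++ ", &amp; "
        ++ (x :: y :: rest).getLastD "" := by
  induction rest generalizing x y with
  | nil =>
    simp only [pvBody, List.dropLast, List.getLastD]
    apply String.toList_inj.mp
    simp [PySem.Str.toList_join]
  | cons z rs ih =>
    have hd : (y :: z :: rs).dropLast = y :: (z :: rs).dropLast := by simp
    calc pvBody (x :: y :: z :: rs)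
        = x ++ ", " ++ pvBody (y :: z :: rs) := rfl
      _ = x ++ ", " ++ (PySem.Str.join ", " ((y :: z :: rs).dropLast) ++ ", &amp; "
            ++ (y :: z :: rs).getLastD "") := by rw [ih]
      _ = _ := by
            have hdl : (x :: y :: z :: rs).dropLast = x :: y :: (z :: rs).dropLast := by simp
            rw [hdl, pv_join_cons_cons, hd]
            simp [String.append_assoc, List.getLastD]

-- ===== VERDICT (by name: the statement is the Claim_ definition above) =====
theorem name_string_spec : Claim_equal_name_string := by
  intro names _
  unfold Spec_name_string name_string name_string_alt
  match names with
  | [] => decide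
  | [x] => simp
  | x :: y :: rest =>
    have hlen : (x :: y :: rest).length ≠ 1 := by simp
    rw [if_neg hlen]
    rw [pv_fold_eq_body (x :: y :: rest) 0 ((x :: y :: rest).length : Int) ""
      (by simp) (by simp)]
    rw [pv_body_eq_alt]
    apply String.toList_inj.mp
    simp
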